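-- pv_equiv track=rewrite | github.com/boblaublaw/soup | soup.py | dist_to_list
-- ===== SOURCE A (Python) =====
-- import string
--
-- def dist_to_list(d):
-- 	"""turns a distribution map into a list of ints"""
-- 	l=[]
-- 	for letter in string.ascii_lowercase:
-- 		if letter in d:
-- 			l.append(d[letter])
-- 		else:
-- 			l.append(0)
-- 	return l
-- ===== SOURCE B (Python) =====
-- import string
--
-- def dist_to_list(d):
-- 	"""turns a distribution map into a list of ints"""
-- 	index = {c: i for i, c in enumerate(string.ascii_lowercase)}
-- 	counts = [0] * 26
-- 	for key, value in d.items():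
-- 		i = index.get(key)
-- 		if i is not None:
-- 			counts[i] = value
-- 	return counts
-- ===== Notes on version B (the rewrite author's own statement) =====
-- stated objective: alternative
-- what changed: B preallocates a 26-slot array and scatters the dict's entries into it via a precomputed letter-to-index map, instead of iterating the 26 letters and gathering with a membership test per letter; Pre_ excludes only association lists with duplicate keys, which cannot arise from a Python dict.
import Mathlib
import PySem

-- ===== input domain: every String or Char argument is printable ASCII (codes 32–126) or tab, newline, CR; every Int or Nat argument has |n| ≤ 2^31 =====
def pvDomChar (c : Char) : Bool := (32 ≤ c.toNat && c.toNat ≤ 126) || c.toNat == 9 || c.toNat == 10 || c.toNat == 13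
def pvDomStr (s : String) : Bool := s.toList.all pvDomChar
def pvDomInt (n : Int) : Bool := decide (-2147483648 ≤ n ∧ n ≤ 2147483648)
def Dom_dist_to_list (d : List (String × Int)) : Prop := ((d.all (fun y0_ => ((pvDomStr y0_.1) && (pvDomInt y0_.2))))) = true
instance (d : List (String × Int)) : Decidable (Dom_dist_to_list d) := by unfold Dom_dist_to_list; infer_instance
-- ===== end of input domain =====

-- B scatters the dict's entries into a preallocated 26-slot list via a letter-to-index map, instead of gathering over the 26 letters with a membership test each (alternative decomposition, same result).


-- ===== PORT A =====
-- string.ascii_lowercase, iterated by Python as 26 one-character strings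
def azLower : List String :=
  ["a","b","c","d","e","f","g","h","i","j","k","l","m",
   "n","o","p","q","r","s","t","u","v","w","x","y","z"]

def dist_to_list (d : List (String × Int)) : List Int :=
  azLower.foldl (fun l letter =>
    match (PySem.Dict.mk d).get? letter with   -- 'if letter in d: … d[letter]' (membership + lookup, first match)
    | some v => l ++ [v]
    | none   => l ++ [0]) []

-- ===== PORT B =====
-- index = {c: i for i, c in enumerate(string.ascii_lowercase)}
def letterIndex : PySem.Dict String Int :=
  PySem.Dict.ofList ((PySem.List.enumerate azLower).map (fun p => (p.2, p.1)))

-- loop body: i = index.get(key); if i is not None: counts[i] = value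
def scatterStep (counts : List Int) (kv : String × Int) : List Int :=
  match letterIndex.get? kv.1 with
  | some i => PySem.List.pySetD counts i kv.2
  | none   => counts

-- for key, value in d.items(): …
def dist_to_list_alt (d : List (String × Int)) : List Int :=
  d.foldl scatterStep (List.replicate 26 0)

-- ===== PRECONDITION & SPEC =====
-- Pre_ excludes association lists with duplicate keys: a Python dict cannot contain them, and on
-- such lists the model's first-match lookup (A's port) and B's scatter order are both accidental.
def Pre_dist_to_list (d : List (String × Int)) : Prop := (d.map Prod.fst).Nodup
instance (d : List (String × Int)) : Decidable (Pre_dist_to_list d) := by unfold Pre_dist_to_list; infer_instance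

def pvWitness_dist_to_list : (List (String × Int)) := [("a", 3), ("q", 5), ("!", 7)]

def Spec_dist_to_list (d : List (String × Int)) (out : List Int) : Prop := out = dist_to_list_alt d
instance (d : List (String × Int)) (out : List Int) : Decidable (Spec_dist_to_list d out) := by unfold Spec_dist_to_list; infer_instance

-- ===== CLAIM (what is proved, stated in full; the proofs are below) =====
def Claim_equal_dist_to_list : Prop := ∀ (d : List (String × Int)), Dom_dist_to_list d → Pre_dist_to_list d → Spec_dist_to_list d (dist_to_list d)

-- ===== LEMMAS AND PROOFS =====

-- looking up s in the letter→index dict is exactly list.index on the 26 letters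
lemma get?_mk_swap_enumerate (L : List String) (n : Int) (s : String) :
    (PySem.Dict.mk ((PySem.List.enumerate L n).map (fun p => (p.2, p.1)))).get? s
      = (PySem.List.index? L s).map (fun k => (k : Int) + n) := by
  induction L generalizing n with
  | nil => simp [PySem.List.enumerate_nil, PySem.Dict.get?, PySem.List.index?]
  | cons x xs ih =>
      rw [PySem.List.enumerate_cons]
      simp only [List.map, PySem.Dict.get?_mk_cons]
      by_cases hx : x = s
      · subst hx
        rw [PySem.List.index?_cons_self]
        simp
      · rw [PySem.List.index?_cons_of_ne xs hx, ih (n+1)]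
        have hbeq : (x == s) = false := by simp [hx]
        simp only [hbeq, Bool.false_eq_true, if_false]
        cases PySem.List.index? xs s with
        | none => rfl
        | some k => simp [Option.map, Option.bind]; ring

lemma letterIndex_get? (s : String) :
    letterIndex.get? s = (PySem.List.index? azLower s).map (fun n => (n : Int)) := by
  have h : letterIndex = PySem.Dict.mk ((PySem.List.enumerate azLower).map (fun p => (p.2, p.1))) := by
    apply PySem.Dict.ext; decide
  rw [h, get?_mk_swap_enumerate]
  simp

-- A's gather loop is a map over the 26 letters
lemma A_eq_map (d : List (String × Int)) :
    dist_to_list d = azLower.map (fun letter => ((PySem.Dict.mk d).get? letter).getD 0) := by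
  have hstep : (fun (l : List Int) (letter : String) =>
      match (PySem.Dict.mk d).get? letter with
      | some v => l ++ [v]
      | none   => l ++ [0])
      = fun l letter => l ++ [((PySem.Dict.mk d).get? letter).getD 0] := by
    funext l letter
    cases (PySem.Dict.mk d).get? letter <;> rfl
  rw [dist_to_list, hstep, PySem.List.foldl_append_singleton_eq_map]
  rfl

lemma azLower_length : azLower.length = 26 := by decide

lemma azLower_getD_mem {j : Nat} (hj : j < 26) : azLower.getD j "" ∈ azLower := by
  rw [List.getD_eq_getElem _ _ (azLower_length ▸ hj)]
  exact List.getElem_mem _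

-- first-match lookup over a literal association list splits on ++
lemma get?_mk_append (l₁ l₂ : List (String × Int)) (s : String) :
    (PySem.Dict.mk (l₁ ++ l₂)).get? s
      = ((PySem.Dict.mk l₁).get? s).orElse (fun _ => (PySem.Dict.mk l₂).get? s) := by
  induction l₁ with
  | nil => simp [PySem.Dict.get?]
  | cons x xs ih =>
      have h1 : (x :: xs) ++ l₂ = x :: (xs ++ l₂) := rfl
      rw [h1, PySem.Dict.get?_mk_cons, PySem.Dict.get?_mk_cons, ih]
      by_cases h : (x.1 == s) = true <;> simp [h, Option.orElse]

lemma get?_mk_eq_none_of_not_mem (l : List (String × Int)) (s : String)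
    (h : s ∉ l.map Prod.fst) : (PySem.Dict.mk l).get? s = none := by
  induction l with
  | nil => rfl
  | cons x xs ih =>
      simp only [List.map_cons, List.mem_cons, not_or] at h
      rw [PySem.Dict.get?_mk_cons, if_neg (by simp [Ne.symm h.1]), ih h.2]

-- with distinct keys, lookup does not depend on the order of the bindings
lemma get?_mk_reverse (l : List (String × Int)) (hnd : (l.map Prod.fst).Nodup) (s : String) :
    (PySem.Dict.mk l.reverse).get? s = (PySem.Dict.mk l).get? s := by
  induction l with
  | nil => rfl
  | cons x xs ih =>
      obtain ⟨k, v⟩ := x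
      simp only [List.map_cons, List.nodup_cons] at hnd
      rw [List.reverse_cons, get?_mk_append, ih hnd.2]
      by_cases h : (k == s) = true
      · have hs : s ∉ xs.map Prod.fst := (eq_of_beq h) ▸ hnd.1
        have h2 : (PySem.Dict.mk ((k, v) :: xs)).get? s = some v := by
          rw [PySem.Dict.get?_mk_cons, if_pos h]
        rw [get?_mk_eq_none_of_not_mem xs s hs, h2]
        simp [PySem.Dict.get?_mk_cons, h, Option.orElse]
      · have h1 : (PySem.Dict.mk ([(k, v)] : List (String × Int))).get? s = none := by
          rw [PySem.Dict.get?_mk_cons, if_neg h]; rfl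
        have h2 : (PySem.Dict.mk ((k, v) :: xs)).get? s = (PySem.Dict.mk xs).get? s := by
          rw [PySem.Dict.get?_mk_cons, if_neg h]
        simp only [h1, h2]
        cases (PySem.Dict.mk xs).get? s <;> simp [Option.orElse]

-- B's scatter loop computes, slot by slot, the first binding of each letter in d (or the initial slot value)
lemma scatter_spec (d : List (String × Int)) (init : List Int) (hlen : init.length = 26) :
    d.reverse.foldl scatterStep init =
      (List.range 26).map (fun j =>
        ((PySem.Dict.mk d).get? (azLower.getD j "")).getD (init.getD j 0)) := by
  induction d with
  | nil =>
      simp only [List.reverse_nil, List.foldl_nil]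
      apply List.ext_getElem (by simp [hlen])
      intro j hj1 hj2
      simp only [List.getElem_map, List.getElem_range]
      have hnone : (PySem.Dict.mk ([] : List (String × Int))).get? (azLower.getD j "") = none := rfl
      rw [hnone]
      simp [List.getElem?_eq_getElem hj1]
  | cons kv rest ih =>
      rw [List.reverse_cons, List.foldl_append]
      simp only [List.foldl_cons, List.foldl_nil]
      rw [ih]
      cases hidx : PySem.List.index? azLower kv.1 with
      | none =>
          have hget : letterIndex.get? kv.1 = none := by
            rw [letterIndex_get?, hidx]; rfl
          rw [scatterStep, hget]
          apply List.map_congr_left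
          intro j hj
          rw [List.mem_range] at hj
          have hk : kv.1 ∉ azLower :=
            (PySem.List.index?_eq_none_iff (xs := azLower) (v := kv.1)).mp hidx
          have hne : ¬ ((kv.1 == azLower.getD j "") = true) := by
            intro he
            exact hk ((eq_of_beq he) ▸ azLower_getD_mem hj)
          rw [PySem.Dict.get?_mk_cons, if_neg hne]
      | some k =>
          have hget : letterIndex.get? kv.1 = some (k : Int) := by
            rw [letterIndex_get?, hidx]; rfl
          rw [scatterStep, hget]
          obtain ⟨hk26, hkval, hfirst⟩ := PySem.List.getElem_of_index?_eq_some hidx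
          simp only [PySem.List.pySetD_natCast]
          apply List.ext_getElem (by simp)
          intro j hj1 hj2
          have hj26 : j < 26 := by simpa using hj2
          rw [List.getElem_set]
          simp only [List.getElem_map, List.getElem_range]
          by_cases hjk : k = j
          · subst hjk
            rw [if_pos rfl]
            have hcond : (kv.1 == azLower.getD k "") = true := by
              rw [List.getD_eq_getElem _ _ hk26, hkval]
              simp
            rw [PySem.Dict.get?_mk_cons, if_pos hcond]
            rfl
          · rw [if_neg hjk]
            have hne : ¬ ((kv.1 == azLower.getD j "") = true) := by
              intro he
              have hjlen : j < azLower.length := azLower_length ▸ hj26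
              have heq : azLower[k] = azLower[j] := by
                rw [hkval, ← List.getD_eq_getElem _ _ hjlen]
                exact (eq_of_beq he)
              exact hjk (List.Nodup.getElem_inj_iff (by decide) |>.mp heq)
            rw [PySem.Dict.get?_mk_cons, if_neg hne]

-- ===== VERDICT (by name: the statement is the Claim_ definition above) =====
theorem dist_to_list_spec : Claim_equal_dist_to_list := by
  intro d _ hpre
  show dist_to_list d = dist_to_list_alt d
  have hrev : dist_to_list_alt d = d.reverse.reverse.foldl scatterStep (List.replicate 26 0) := by
    rw [List.reverse_reverse]; rfl
  rw [A_eq_map, hrev, scatter_spec d.reverse _ (by simp)]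
  apply List.ext_getElem (by simp [azLower_length])
  intro j hj1 hj2
  have hj26 : j < 26 := azLower_length ▸ hj1
  simp only [List.getElem_map, List.getElem_range]
  rw [get?_mk_reverse d hpre]
  rw [List.getD_eq_getElem _ _ (azLower_length ▸ hj26)]
  rw [List.getD_eq_getElem _ _ (show j < (List.replicate 26 (0:Int)).length by simpa using hj26),
    List.getElem_replicate]
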